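-- pv_equiv track=rewrite | github.com/Pedro-Muller29/Algorithms-Club---PUCRS | 8nov/8nov2.py | check_landing
-- ===== SOURCE A (Python) =====
-- def check_landing(x,y):
--     distancia = 0
--     altura = 0
--     while True:
--         distancia += x
--         altura += y
--         if x > 0:
--             x -= 1
--         y -= 1
--         if 50 >= distancia >= 14:
--             if -225 >= altura >= -267:
--                 return True
--         if altura < -267 or distancia > 50:
--             return False
-- ===== SOURCE B (Python) =====
-- def _alt(y, n):
--     # altitude after n steps: n*y - (0+1+...+(n-1))
--     return n * y - n * (n - 1) // 2
--
-- def _dist(x, n):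
--     # distance after n steps, with the per-step x clamped at 0 once it reaches 0
--     if x <= 0:
--         return n * x
--     if n <= x:
--         return n * x - n * (n - 1) // 2
--     return x * (x + 1) // 2
--
-- def check_landing(x, y):
--     n = 1
--     while True:
--         altura = _alt(y, n)
--         distancia = _dist(x, n)
--         if 14 <= distancia and distancia <= 50 and -267 <= altura and altura <= -225:
--             return True
--         if altura < -267 or distancia > 50:
--             return False
--         n += 1
-- ===== Notes on version B (the rewrite author's own statement) =====
-- stated objective: alternative
-- what changed: Replaces the in-loop mutation of x, y and the running accumulators by a loop over a step counter n that computes altitude and distance at step n in closed form (triangular-number formulas with a clamp for x).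
import Mathlib
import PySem

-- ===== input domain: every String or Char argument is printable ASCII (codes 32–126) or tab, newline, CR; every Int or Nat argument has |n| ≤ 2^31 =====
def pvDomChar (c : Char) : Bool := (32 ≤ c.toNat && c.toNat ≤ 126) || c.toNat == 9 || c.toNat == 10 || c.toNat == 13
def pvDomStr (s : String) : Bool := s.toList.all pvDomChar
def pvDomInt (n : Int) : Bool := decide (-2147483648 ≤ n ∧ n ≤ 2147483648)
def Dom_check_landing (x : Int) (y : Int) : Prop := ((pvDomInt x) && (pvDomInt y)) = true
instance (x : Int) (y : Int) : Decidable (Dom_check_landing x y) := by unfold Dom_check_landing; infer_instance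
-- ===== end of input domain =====

-- B replaces A's in-loop mutation of x, y and the accumulators by closed-form
-- formulas indexed by the step counter n (alternative decomposition, same cost).
-- Both loops are ported with a fuel counter of 2|y|+601 steps, a pure totality
-- guard: the altitude is provably below the -267 cutoff before fuel runs out.

-- ===== PORT A =====
-- A's while-True loop as recursion on the loop state
-- (distancia, altura updated first; then x, y decremented; then the two tests,
-- success before failure — Python's nested 'if' combined into one conjunction
-- since falling out of the inner if reaches the same failure test).
def check_landing_go : Nat → Int → Int → Int → Int → Bool
  | 0, _, _, _, _ => false
  | fuel+1, x, y, distancia, altura =>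
    if 50 ≥ distancia + x ∧ distancia + x ≥ 14 ∧ -225 ≥ altura + y ∧ altura + y ≥ -267 then
      true
    else if altura + y < -267 ∨ distancia + x > 50 then
      false
    else
      check_landing_go fuel (if x > 0 then x - 1 else x) (y - 1) (distancia + x) (altura + y)

def check_landing (x : Int) (y : Int) : Bool :=
  check_landing_go (2 * |y| + 601).toNat x y 0 0

-- ===== PORT B =====
-- closed-form altitude after n steps (Source B's _alt)
def altN (y n : Int) : Int := n * y - PySem.Int.floordiv (n * (n - 1)) 2

-- closed-form distance after n steps (Source B's _dist)
def distN (x n : Int) : Int :=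
  if x ≤ 0 then n * x
  else if n ≤ x then n * x - PySem.Int.floordiv (n * (n - 1)) 2
  else PySem.Int.floordiv (x * (x + 1)) 2

def check_landing_alt_go : Nat → Int → Int → Int → Bool
  | 0, _, _, _ => false
  | fuel+1, x, y, n =>
    if 14 ≤ distN x n ∧ distN x n ≤ 50 ∧ -267 ≤ altN y n ∧ altN y n ≤ -225 then
      true
    else if altN y n < -267 ∨ distN x n > 50 then
      false
    else
      check_landing_alt_go fuel x y (n + 1)

def check_landing_alt (x : Int) (y : Int) : Bool :=
  check_landing_alt_go (2 * |y| + 601).toNat x y 1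

-- ===== PRECONDITION & SPEC =====
def Spec_check_landing (x : Int) (y : Int) (out : Bool) : Prop := out = check_landing_alt x y
instance (x : Int) (y : Int) (out : Bool) : Decidable (Spec_check_landing x y out) := by unfold Spec_check_landing; infer_instance

-- ===== CLAIM (what is proved, stated in full; the proofs are below) =====
def Claim_equal_check_landing : Prop := ∀ (x : Int) (y : Int), Dom_check_landing x y → Spec_check_landing x y (check_landing x y)

-- ===== LEMMAS AND PROOFS =====

-- A's current x at the start of iteration n (it decrements while positive)
def xcur (x n : Int) : Int := if x ≤ 0 then x else if n ≤ x then x - (n - 1) else 0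

theorem floordiv_double (n : Int) :
    2 * PySem.Int.floordiv (n * (n - 1)) 2 = n * (n - 1) := by
  obtain ⟨k, hk⟩ := Int.even_mul_succ_self (n - 1)
  have hk2 : n * (n - 1) = 2 * k := by
    have : (n - 1) * (n - 1 + 1) = n * (n - 1) := by ring
    omega
  rw [PySem.Int.floordiv_eq_ediv_of_pos (by norm_num), hk2,
      Int.mul_ediv_cancel_left _ (by norm_num : (2:Int) ≠ 0)]

theorem floordiv_succ (n : Int) :
    PySem.Int.floordiv ((n + 1) * n) 2 = PySem.Int.floordiv (n * (n - 1)) 2 + n := by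
  have h1 : (n + 1) * n = (n + 1) * ((n + 1) - 1) := by ring
  have hd1 := floordiv_double (n + 1)
  have hd0 := floordiv_double n
  have h2 : (n + 1) * ((n + 1) - 1) = n * (n - 1) + 2 * n := by ring
  rw [h1]
  omega

theorem altN_succ (y n : Int) : altN y (n + 1) = altN y n + (y - n) := by
  unfold altN
  have := floordiv_succ n
  have h1 : (n + 1) * (n + 1 - 1) = (n + 1) * n := by ring
  rw [h1, this]
  ring

theorem distN_succ (x n : Int) :
    distN x (n + 1) = distN x n + xcur x (n + 1) := by
  unfold distN xcur
  by_cases hx : x ≤ 0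
  · simp only [if_pos hx]; ring
  · simp only [if_neg hx]
    by_cases h1 : n + 1 ≤ x
    · have h2 : n ≤ x := by omega
      simp only [if_pos h1, if_pos h2]
      have h3 : (n + 1) * (n + 1 - 1) = (n + 1) * n := by ring
      rw [h3, floordiv_succ]
      ring
    · by_cases h2 : n ≤ x
      · -- n = x : the distance reaches its cap x*(x+1)//2 exactly here
        have hx2 : n = x := by omega
        simp only [if_neg h1, if_pos h2]
        subst hx2
        have hs := floordiv_succ n
        have hdbl := floordiv_double n
        have hc : n * (n + 1) = (n + 1) * n := by ring
        have hr : n * (n - 1) = n * n - n := by ring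
        rw [hc, hs]
        omega
      · simp only [if_neg h1, if_neg h2]
        omega

-- main correspondence: A's loop state at the start of iteration n equals B's
-- closed forms at index n-1, so with equal fuel the two loops run in lockstep
theorem go_eq (fuel : ℕ) : ∀ (x y n : Int), 1 ≤ n →
    check_landing_go fuel (xcur x n) (y - (n - 1)) (distN x (n - 1)) (altN y (n - 1)) =
      check_landing_alt_go fuel x y n := by
  induction fuel with
  | zero => intro x y n _; rfl
  | succ fuel ih =>
    intro x y n hn
    have ha : altN y (n - 1) + (y - (n - 1)) = altN y n := by
      have := altN_succ y (n - 1)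
      have h1 : n - 1 + 1 = n := by ring
      rw [h1] at this
      omega
    have hd : distN x (n - 1) + xcur x n = distN x n := by
      have := distN_succ x (n - 1)
      have h1 : n - 1 + 1 = n := by ring
      rw [h1] at this
      omega
    simp only [check_landing_go, check_landing_alt_go, ha, hd]
    by_cases hC : 14 ≤ distN x n ∧ distN x n ≤ 50 ∧ -267 ≤ altN y n ∧ altN y n ≤ -225
    · rw [if_pos (by omega), if_pos hC]
    · rw [if_neg (by omega), if_neg hC]
      by_cases hF : altN y n < -267 ∨ distN x n > 50
      · rw [if_pos hF, if_pos hF]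
      · rw [if_neg hF, if_neg hF]
        have hx' : (if xcur x n > 0 then xcur x n - 1 else xcur x n) = xcur x (n + 1) := by
          unfold xcur
          by_cases hx : x ≤ 0
          · simp only [if_pos hx]
            rw [if_neg (by omega : ¬ x > 0)]
          · simp only [if_neg hx]
            by_cases h2 : n + 1 ≤ x
            · have h1 : n ≤ x := by omega
              rw [if_pos h1, if_pos h2, if_pos (by omega : x - (n - 1) > 0)]
              ring
            · by_cases h1 : n ≤ x
              · rw [if_pos h1, if_neg h2, if_pos (by omega : x - (n - 1) > 0)]
                omega
              · rw [if_neg h1, if_neg h2, if_neg (by omega : ¬ (0:Int) > 0)]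
        have hy' : y - (n - 1) - 1 = y - n := by ring
        rw [hx', hy']
        have hgoal := ih x y (n + 1) (by omega)
        have h1 : n + 1 - 1 = n := by ring
        rw [h1] at hgoal
        exact hgoal

-- ===== VERDICT (by name: the statement is the Claim_ definition above) =====
theorem check_landing_spec : Claim_equal_check_landing := by
  intro x y _
  unfold Spec_check_landing check_landing check_landing_alt
  have h := go_eq (2 * |y| + 601).toNat x y 1 (by omega)
  have hx : xcur x 1 = x := by
    unfold xcur
    by_cases hxx : x ≤ 0
    · rw [if_pos hxx]
    · rw [if_neg hxx, if_pos (by omega : (1:Int) ≤ x)]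
      omega
  have hd0 : distN x 0 = 0 := by
    unfold distN
    have hfd0 : PySem.Int.floordiv ((0:Int) * (0 - 1)) 2 = 0 := by
      rw [PySem.Int.floordiv_eq_ediv_of_pos (by norm_num)]; norm_num
    by_cases hxx : x ≤ 0
    · rw [if_pos hxx]; ring
    · rw [if_neg hxx, if_pos (by omega : (0:Int) ≤ x), hfd0]; ring
  have ha0 : altN y 0 = 0 := by
    unfold altN
    have hfd0 : PySem.Int.floordiv ((0:Int) * (0 - 1)) 2 = 0 := by
      rw [PySem.Int.floordiv_eq_ediv_of_pos (by norm_num)]; norm_num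
    rw [hfd0]; ring
  rw [hx] at h
  norm_num at h
  rw [hd0, ha0] at h
  exact h
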